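-- pv_equiv track=rewrite | github.com/Endrio-Korb/Python | Codewars/Count_The_Smile_Faces.py | count_smileys2
-- ===== SOURCE A (Python) =====
-- def count_smileys2(arr):
--     not_smile = [';(', ':>', ':}', ':[', ';*', ':$', ':O', ':;', ':(']
--     saida = []
--     for i in arr:
--         saida.append(i)
--     for i in arr:
--         for j in not_smile:
--             if i == j:
--                 saida.remove(j)
--     return len(saida)
-- ===== SOURCE B (Python) =====
-- def count_smileys2(arr):
--     not_smile = {';(', ':>', ':}', ':[', ';*', ':$', ':O', ':;', ':('}
--     count = 0
--     for x in arr: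
--         if x not in not_smile:
--             count += 1
--     return count
-- ===== Notes on version B (the rewrite author's own statement) =====
-- stated objective: simpler
-- what changed: B replaces A's build-a-copy-then-remove-matches-from-it machinery (two loops plus an inner scan over the blacklist with list.remove) by a single pass that keeps one integer counter of non-blacklisted elements, checked against a set literal.
import Mathlib
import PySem

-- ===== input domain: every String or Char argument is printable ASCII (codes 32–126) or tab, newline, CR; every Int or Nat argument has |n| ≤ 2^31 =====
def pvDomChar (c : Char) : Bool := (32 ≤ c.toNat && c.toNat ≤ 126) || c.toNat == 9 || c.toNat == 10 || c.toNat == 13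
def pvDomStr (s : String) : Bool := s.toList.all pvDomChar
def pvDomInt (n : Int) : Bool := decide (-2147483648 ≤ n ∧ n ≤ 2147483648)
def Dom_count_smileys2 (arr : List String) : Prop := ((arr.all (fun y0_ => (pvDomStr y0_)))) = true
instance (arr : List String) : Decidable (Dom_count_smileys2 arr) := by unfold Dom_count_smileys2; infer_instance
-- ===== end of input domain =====

-- B replaces A's copy-then-remove machinery by a single counting pass over arr (simpler decomposition).


-- ===== PORT A =====
def pvNotSmile : List String := [";(", ":>", ":}", ":[", ";*", ":$", ":O", ":;", ":("]

-- literal transliteration of A: copy arr into saida, then for each i in arr and each j in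
-- not_smile, if i == j remove j from saida; return len(saida).
-- list.remove is PySem.List.remove?; its `none` (ValueError) case is unreachable here
-- (the removed value was itself copied from arr), so `.getD s` never fires.
def count_smileys2 (arr : List String) : Int :=
  let saida := arr.foldl (fun s i => s ++ [i]) []
  let saida := arr.foldl (fun s i =>
    pvNotSmile.foldl (fun s j => if i == j then (PySem.List.remove? s j).getD s else s) s) saida
  (saida.length : Int)

-- ===== PORT B =====
def pvBadSet : PySem.Set String :=
  PySem.Set.ofList [";(", ":>", ":}", ":[", ";*", ":$", ":O", ":;", ":("]

-- literal transliteration of B: one pass, one integer counter.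
def count_smileys2_alt (arr : List String) : Int :=
  arr.foldl (fun count x => if PySem.Set.contains pvBadSet x then count else count + 1) 0

-- ===== PRECONDITION & SPEC =====
def Spec_count_smileys2 (arr : List String) (out : Int) : Prop := out = count_smileys2_alt arr
instance (arr : List String) (out : Int) : Decidable (Spec_count_smileys2 arr out) := by unfold Spec_count_smileys2; infer_instance

-- ===== CLAIM (what is proved, stated in full; the proofs are below) =====
def Claim_equal_count_smileys2 : Prop := ∀ (arr : List String), Dom_count_smileys2 arr → Spec_count_smileys2 arr (count_smileys2 arr)

-- ===== LEMMAS AND PROOFS =====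

-- The inner loop of A compares i against each blacklist literal; at most one comparison can
-- succeed, so the whole inner fold is a single conditional removal of i.
lemma pv_inner_eq (i : String) (s : List String) :
    pvNotSmile.foldl (fun s j => if i == j then (PySem.List.remove? s j).getD s else s) s
      = if pvNotSmile.contains i then (PySem.List.remove? s i).getD s else s := by
  by_cases h : i ∈ pvNotSmile
  · fin_cases h <;> simp [pvNotSmile, List.foldl]
  · have h' : ¬ pvNotSmile.contains i := by simpa using h
    simp only [pvNotSmile, List.mem_cons, List.not_mem_nil, or_false] at h
    push Not at h
    obtain ⟨h1, h2, h3, h4, h5, h6, h7, h8, h9⟩ := h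
    simp [pvNotSmile, List.foldl, h1, h2, h3, h4, h5, h6, h7, h8, h9]

-- A's outer loop removes one occurrence of each blacklisted element of r from s; as long as r
-- is a sub-permutation of s every removal succeeds and the final length is
-- s.length - (number of blacklisted elements of r).
lemma pv_outer_len (r : List String) : ∀ (s : List String), List.Subperm r s →
    (r.foldl (fun s i =>
        pvNotSmile.foldl (fun s j => if i == j then (PySem.List.remove? s j).getD s else s) s)
      s).length
      = s.length - r.countP (fun x => pvNotSmile.contains x) := by
  induction r with
  | nil => intro s _; simp
  | cons i r ih =>
    intro s hsp
    have hmem : i ∈ s := hsp.subset (List.mem_cons_self ..)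
    simp only [List.foldl_cons, pv_inner_eq, List.countP_cons]
    by_cases hb : pvNotSmile.contains i
    · have hrm : PySem.List.remove? s i = some (s.erase i) :=
        PySem.List.remove?_eq_some_erase s i hmem
      have hsub : List.Subperm r (s.erase i) := by
        have := hsp.erase i
        simpa using this
      have hlen : (s.erase i).length = s.length - 1 := List.length_erase_of_mem hmem
      have hcnt : r.countP (fun x => pvNotSmile.contains x) ≤ (s.erase i).length :=
        le_trans List.countP_le_length hsub.length_le
      have ih' := ih _ hsub
      simp only [pv_inner_eq] at ih'
      rw [if_pos hb, hrm]
      simp only [Option.getD_some]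
      rw [ih', hlen, if_pos hb]
      omega
    · have hsub : List.Subperm r s := (List.Subperm.cons_self).trans hsp
      have ih' := ih _ hsub
      simp only [pv_inner_eq] at ih'
      rw [if_neg hb, ih', if_neg hb]
      omega

-- B's counter counts the non-blacklisted elements.
lemma pv_alt_eq (arr : List String) :
    count_smileys2_alt arr = ((arr.countP (fun x => !pvNotSmile.contains x) : Nat) : Int) := by
  unfold count_smileys2_alt
  have hset : pvBadSet = pvNotSmile := by decide
  have hfun : (fun (count : Int) (x : String) =>
        if PySem.Set.contains pvBadSet x then count else count + 1)
      = (fun (count : Int) (x : String) =>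
        if (!pvNotSmile.contains x) then count + 1 else count) := by
    funext c x
    rw [hset]
    cases h : pvNotSmile.contains x
    · have h' : x ∉ pvNotSmile := by simpa using h
      simp [PySem.Set.contains, h']
    · have h' : x ∈ pvNotSmile := by simpa using h
      simp [PySem.Set.contains, h']
  rw [hfun, PySem.List.foldl_count_if]
  simp

-- ===== VERDICT (by name: the statement is the Claim_ definition above) =====
theorem count_smileys2_spec : Claim_equal_count_smileys2 := by
  intro arr _
  unfold Spec_count_smileys2
  unfold count_smileys2
  rw [PySem.List.foldl_append_singleton]
  rw [pv_alt_eq]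
  have h := pv_outer_len arr arr (List.Subperm.refl arr)
  simp only [List.nil_append, h]
  have h1 : arr.countP (fun x => pvNotSmile.contains x) ≤ arr.length :=
    List.countP_le_length
  have h2 : arr.length = arr.countP (fun x => pvNotSmile.contains x)
      + arr.countP (fun x => !pvNotSmile.contains x) := by
    simpa [decide_not] using
      List.length_eq_countP_add_countP (p := fun x => pvNotSmile.contains x) (l := arr)
  omega
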